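-- pv_equiv track=rewrite | github.com/mharty3/advent_of_code | 2022/day-10.py | display_monitor
-- ===== SOURCE A (Python) =====
-- def display_monitor(register):
--     screen = []
--     for i, x in enumerate(register):
--
--         if i % 40 in [x -1, x, x+1]:
--             screen.append('#')
--         else:
--             screen.append('.')
--         if (i+1) % 40 == 0 and (i+1) != 0:
--             screen.append('\n')
--
--     return ''.join(screen)
-- ===== SOURCE B (Python) =====
-- def display_monitor(register):
--     lines = []
--     for start in range(0, len(register), 40):
--         row = register[start:start + 40]
--         line = ''.join('#' if abs(x - c) <= 1 else '.' for c, x in enumerate(row))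
--         if len(row) == 40:
--             line += '\n'
--         lines.append(line)
--     return ''.join(lines)
-- ===== Notes on version B (the rewrite author's own statement) =====
-- stated objective: alternative
-- what changed: B slices the register into 40-wide rows and renders each row with an enumerate-comprehension using abs(x-c)<=1, appending a newline only to complete rows, instead of A's single per-character loop tracking a running index with mod-40 tests and per-character list appends.
import Mathlib
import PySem

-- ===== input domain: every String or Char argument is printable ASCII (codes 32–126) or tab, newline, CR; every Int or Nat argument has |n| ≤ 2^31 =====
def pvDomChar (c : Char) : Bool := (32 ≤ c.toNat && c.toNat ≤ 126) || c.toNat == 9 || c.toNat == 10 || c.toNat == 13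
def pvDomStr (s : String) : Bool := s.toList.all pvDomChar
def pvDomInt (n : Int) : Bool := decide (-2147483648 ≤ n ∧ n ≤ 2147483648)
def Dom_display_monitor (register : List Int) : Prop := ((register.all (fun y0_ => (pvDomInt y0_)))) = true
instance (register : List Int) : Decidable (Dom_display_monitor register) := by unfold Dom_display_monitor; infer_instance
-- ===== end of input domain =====

-- B renders the screen one 40-wide row at a time (slicing row start:start+40 and rendering it with
-- an enumerate-comprehension) instead of A's single per-character loop with running-index mod tests;
-- alternative decomposition.

-- ===== PORT A =====
-- the for-loop 'for i, x in enumerate(register)': state = (remaining elements, index i, screen)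
def pvDmLoop : List Int → Int → List String → List String
  | [], _, screen => screen
  | x :: rest, i, screen =>
    let screen1 := if PySem.Int.mod i 40 ∈ [x - 1, x, x + 1] then screen ++ ["#"] else screen ++ ["."]
    let screen2 := if PySem.Int.mod (i + 1) 40 == 0 && (i + 1) != 0 then screen1 ++ ["\n"] else screen1
    pvDmLoop rest (i + 1) screen2

def display_monitor (register : List Int) : String :=
  PySem.Str.join "" (pvDmLoop register 0 [])

-- ===== PORT B =====
-- ''.join('#' if abs(x - c) <= 1 else '.' for c, x in enumerate(row))
def pvRenderRow (row : List Int) : String :=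
  PySem.Str.join "" ((PySem.List.enumerate row 0).map
    (fun p => if (p.2 - p.1).natAbs ≤ 1 then ("#" : String) else "."))

-- the row loop of Source B: for start in range(0, len(register), 40): row = register[start:start+40]; …
def display_monitor_alt (register : List Int) : String :=
  PySem.Str.join "" ((PySem.List.pyRange 0 (PySem.List.len register) 40).map (fun start =>
    let row := PySem.List.slice register (some start) (some (start + 40))
    let line := pvRenderRow row
    if PySem.List.len row = 40 then line ++ "\n" else line))

-- ===== PRECONDITION & SPEC =====
def Spec_display_monitor (register : List Int) (out : String) : Prop := out = display_monitor_alt register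
instance (register : List Int) (out : String) : Decidable (Spec_display_monitor register out) := by unfold Spec_display_monitor; infer_instance

-- ===== CLAIM (what is proved, stated in full; the proofs are below) =====
def Claim_equal_display_monitor : Prop := ∀ (register : List Int), Dom_display_monitor register → Spec_display_monitor register (display_monitor register)

-- ===== LEMMAS AND PROOFS =====

-- reference rendering: one char per element, at column c (< 40) of the current row
def pvCell (c : Int) (x : Int) : Char := if c ∈ [x - 1, x, x + 1] then '#' else '.'

def pvSpec : List Int → Nat → List Char
  | [], _ => []
  | x :: r, c =>
    pvCell c x :: (if c + 1 = 40 then '\n' :: pvSpec r 0 else pvSpec r (c + 1))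

-- one row rendered from column c on (cut off at column 40), no newline
def pvRowChars : List Int → Nat → List Char
  | [], _ => []
  | x :: r, c => if 40 ≤ c then [] else pvCell c x :: pvRowChars r (c + 1)

-- proof-side row-at-a-time recursion: the chunked loop in structural form
def pvAltLoop : List Int → List String
  | [] => []
  | x :: rest0 =>
    let row := (x :: rest0).take 40
    let line := pvRenderRow row
    let line := if row.length = 40 then line ++ "\n" else line
    line :: pvAltLoop ((x :: rest0).drop 40)
  termination_by l => l.length
  decreasing_by simp

theorem pvJoin_nil_toList (l : List String) :
    (PySem.Str.join "" l).toList = l.flatMap String.toList := by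
  induction l with
  | nil => simp [PySem.Str.toList_join, PySem.Chars.join_nil]
  | cons a r ih =>
    cases r with
    | nil => simp [PySem.Str.toList_join, PySem.Chars.join_singleton]
    | cons b r' =>
      rw [PySem.Str.toList_join] at ih ⊢
      simp only [List.map_cons, PySem.Chars.join_cons_cons, List.flatMap_cons]
      rw [← List.map_cons, ih]
      simp

theorem pvDmLoop_append (reg : List Int) (i : Int) (s t : List String) :
    pvDmLoop reg i (s ++ t) = s ++ pvDmLoop reg i t := by
  induction reg generalizing i t with
  | nil => simp [pvDmLoop]
  | cons x rest ih =>
    simp only [pvDmLoop]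
    split_ifs <;> simp only [List.append_assoc] <;> exact ih _ _

theorem pvDmLoop_acc (reg : List Int) (i : Int) (s : List String) :
    pvDmLoop reg i s = s ++ pvDmLoop reg i [] := by
  simpa using pvDmLoop_append reg i s []

theorem pvCharsA (reg : List Int) (n : Nat) :
    (pvDmLoop reg (n : Int) []).flatMap String.toList = pvSpec reg (n % 40) := by
  induction reg generalizing n with
  | nil => simp [pvDmLoop, pvSpec]
  | cons x rest ih =>
    have hmod : PySem.Int.mod (n:Int) 40 = ((n % 40 : Nat) : Int) := by
      rw [PySem.Int.mod_eq_emod_of_pos (by omega)]; omega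
    have hmod2 : PySem.Int.mod ((n:Int) + 1) 40 = (((n+1) % 40 : Nat) : Int) := by
      rw [PySem.Int.mod_eq_emod_of_pos (by omega)]; push_cast; omega
    have hne : (((n:Int) + 1) != 0) = true := by simp; omega
    have hcast : (n : Int) + 1 = ((n+1 : Nat) : Int) := by push_cast; ring
    simp only [pvDmLoop, hmod, hmod2, hne, Bool.and_true, List.nil_append]
    rw [pvDmLoop_acc, hcast]
    have ih' : List.flatMap String.toList (pvDmLoop rest ((n:Int) + 1) []) = pvSpec rest ((n+1) % 40) := by
      rw [hcast]; exact ih (n+1)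
    by_cases h2 : (n+1) % 40 = 0 <;>
      by_cases c1 : (n:Int) % 40 = x - 1 ∨ (n:Int) % 40 = x ∨ (n:Int) % 40 = x + 1
    · have h39 : n % 40 + 1 = 40 := by omega
      simp [pvSpec, pvCell, h2, h39, c1, ih']
    · have h39 : n % 40 + 1 = 40 := by omega
      simp [pvSpec, pvCell, h2, h39, c1, ih']
    · have h39 : ¬ (n % 40 + 1 = 40) := by omega
      have hsh : (n+1) % 40 = n % 40 + 1 := by omega
      have hz : ¬ ((n:Int) % 40 + 1 = 0) := by omega
      simp [pvSpec, pvCell, h39, hsh, hz, c1, ih']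
    · have h39 : ¬ (n % 40 + 1 = 40) := by omega
      have hsh : (n+1) % 40 = n % 40 + 1 := by omega
      have hz : ¬ ((n:Int) % 40 + 1 = 0) := by omega
      simp [pvSpec, pvCell, h39, hsh, hz, c1, ih']

theorem pvRowChars_high (r : List Int) (c : Nat) (h : 40 ≤ c) : pvRowChars r c = [] := by
  cases r <;> simp [pvRowChars, h]

theorem pvRenderRow_chars_gen (row : List Int) (n : Nat) (h : n + row.length ≤ 40) :
    ((PySem.List.enumerate row (n : Int)).map
      (fun p => if (p.2 - p.1).natAbs ≤ 1 then ("#" : String) else ".")).flatMap String.toList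
      = pvRowChars row n := by
  induction row generalizing n with
  | nil => simp [PySem.List.enumerate_nil, pvRowChars]
  | cons x r ih =>
    have hn : ¬ (40 ≤ n) := by simp at h; omega
    have hcell : (if ((x - (n:Int)).natAbs ≤ 1) then ("#":String) else ".") =
        (if (n:Int) ∈ [x - 1, x, x + 1] then ("#":String) else ".") := by
      congr 1
      simp only [List.mem_cons, List.not_mem_nil, or_false, eq_iff_iff]
      omega
    have hcast : (n : Int) + 1 = ((n+1 : Nat) : Int) := by push_cast; ring
    rw [PySem.List.enumerate_cons]
    simp only [List.map_cons, List.flatMap_cons, hcell, pvRowChars, hn, if_false, hcast,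
      ih (n+1) (by simp at h ⊢; omega)]
    by_cases c1 : (n:Int) ∈ [x - 1, x, x + 1] <;> simp [c1, pvCell]

theorem pvSpec_split (reg : List Int) (c : Nat) (hc : c < 40) :
    pvSpec reg c = pvRowChars reg c ++
      (if 40 ≤ reg.length + c then '\n' :: pvSpec (reg.drop (40 - c)) 0 else []) := by
  induction reg generalizing c with
  | nil => simp [pvSpec, pvRowChars]; omega
  | cons x r ih =>
    have hn : ¬ (40 ≤ c) := by omega
    by_cases h1 : c + 1 = 40
    · have h40 : 40 ≤ r.length + 1 + c := by omega
      have hd : (40 - c) = 1 := by omega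
      simp [pvSpec, pvRowChars, hn, h1, h40, hd, pvRowChars_high r 40 (by omega)]
    · have hlt : c + 1 < 40 := by omega
      have hd : 40 - c = (40 - (c+1)) + 1 := by omega
      simp only [pvSpec, pvRowChars, hn, if_false, h1, ih (c+1) hlt]
      simp only [hd, List.drop_succ_cons, List.length_cons]
      have : (r.length + 1 + c) = (r.length + (c+1)) := by omega
      rw [this]
      simp [List.cons_append]

theorem pvRowChars_take (reg : List Int) (c : Nat) :
    pvRowChars (reg.take (40 - c)) c = pvRowChars reg c := by
  induction reg generalizing c with
  | nil => simp
  | cons x r ih =>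
    by_cases hc : 40 ≤ c
    · simp [pvRowChars, hc, show 40 - c = 0 by omega]
    · have hd : 40 - c = (40 - (c+1)) + 1 := by omega
      rw [hd]
      simp only [List.take_succ_cons, pvRowChars, hc, if_false]
      rw [ih (c+1)]

theorem pvCharsB (reg : List Int) :
    (pvAltLoop reg).flatMap String.toList = pvSpec reg 0 := by
  induction reg using pvAltLoop.induct with
  | case1 => simp [pvAltLoop, pvSpec]
  | case2 x rest0 ih =>
    have hrc : (pvRenderRow ((x :: rest0).take 40)).toList = pvRowChars (x :: rest0) 0 := by
      rw [pvRenderRow, pvJoin_nil_toList]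
      have h0 : ((0:Nat) : Int) = 0 := by norm_cast
      have := pvRenderRow_chars_gen ((x :: rest0).take 40) 0 (by simp)
      rw [h0] at this
      rw [this]
      have := pvRowChars_take (x :: rest0) 0
      simpa using this
    rw [pvSpec_split (x :: rest0) 0 (by omega)]
    simp only [pvAltLoop, List.flatMap_cons]
    by_cases h : 40 ≤ (x :: rest0).length
    · have h40 : ((x :: rest0).take 40).length = 40 := by simp at h ⊢; omega
      rw [if_pos h40]
      simp only [String.toList_append, hrc, ih]
      have : (40 : Nat) ≤ (x :: rest0).length + 0 := by omega
      rw [if_pos this]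
      simp
    · have h40 : ¬ (((x :: rest0).take 40).length = 40) := by
        simp at h ⊢; omega
      rw [if_neg h40]
      have hdrop : (x :: rest0).drop 40 = [] := by
        apply List.drop_eq_nil_of_le; omega
      have : ¬ ((40 : Nat) ≤ (x :: rest0).length + 0) := by omega
      rw [if_neg this, hrc, hdrop]
      simp [pvAltLoop]

theorem pvRange40_nil (a b : Int) (h : b ≤ a) : PySem.List.pyRange a b 40 = [] := by
  simp [PySem.List.pyRange, show ¬(a < b) by omega]

theorem pvRange40_cons (a b : Int) (h : a < b) :
    PySem.List.pyRange a b 40 = a :: PySem.List.pyRange (a + 40) b 40 := by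
  simp only [PySem.List.pyRange, if_neg (by norm_num : (40:Int) ≠ 0), if_pos (by norm_num : (0:Int) < 40), if_pos h]
  by_cases h2 : a + 40 < b
  · rw [if_pos h2]
    have hc : ((b - a + 40 - 1) / 40).toNat = ((b - (a + 40) + 40 - 1) / 40).toNat + 1 := by omega
    rw [hc, List.range_succ_eq_map, List.map_cons, List.map_map]
    congr 1
    · simp
    · apply List.map_congr_left
      intro k _
      simp [Function.comp]
      ring
  · rw [if_neg h2]
    have hc : ((b - a + 40 - 1) / 40).toNat = 1 := by omega
    rw [hc]
    simp

theorem pvMapRange (n : Nat) (reg : List Int) (a : Nat) (hn : reg.length - a ≤ n) :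
    ((PySem.List.pyRange (a : Int) (reg.length : Int) 40).map (fun start =>
      let row := PySem.List.slice reg (some start) (some (start + 40))
      let line := pvRenderRow row
      if PySem.List.len row = 40 then line ++ "\n" else line))
    = pvAltLoop (reg.drop a) := by
  induction n generalizing a with
  | zero =>
    have hle : reg.length ≤ a := by omega
    rw [pvRange40_nil _ _ (by exact_mod_cast hle)]
    rw [List.drop_eq_nil_of_le hle]
    simp [pvAltLoop]
  | succ n ih =>
    by_cases h : reg.length ≤ a
    · rw [pvRange40_nil _ _ (by exact_mod_cast h)]
      rw [List.drop_eq_nil_of_le h]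
      simp [pvAltLoop]
    · have ha : a < reg.length := by omega
      rw [pvRange40_cons _ _ (by exact_mod_cast ha)]
      rw [List.map_cons]
      have hcast : ((a:Int) + 40) = (((a + 40 : Nat)) : Int) := by push_cast; ring
      have hslice : PySem.List.slice reg (some (a:Int)) (some (((a + 40 : Nat)) : Int)) = (reg.drop a).take 40 := by
        have := PySem.List.slice_natCast reg a (a+40)
        rw [this]
        congr 1
        omega
      have hd : ∃ x t, reg.drop a = x :: t := by
        rcases hx : reg.drop a with _ | ⟨x, t⟩
        · exfalso; have := List.drop_eq_nil_iff.mp hx; omega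
        · exact ⟨x, t, rfl⟩
      rcases hd with ⟨x, t, hxt⟩
      rw [hcast, ih (a + 40) (by omega), hxt]
      conv_rhs => rw [pvAltLoop]
      simp only [hslice, hxt]
      congr 1
      · have hlen : (PySem.List.len ((x :: t).take 40) = (40:Int)) ↔ ((x :: t).take 40).length = 40 := by
          simp
          omega
        by_cases hl : ((x :: t).take 40).length = 40
        · rw [if_pos (hlen.mpr hl), if_pos hl]
        · rw [if_neg (fun hh => hl (hlen.mp hh)), if_neg hl]
      · rw [← hxt, List.drop_drop]

-- ===== VERDICT (by name: the statement is the Claim_ definition above) =====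
theorem display_monitor_spec : Claim_equal_display_monitor := by
  intro reg _
  unfold Spec_display_monitor display_monitor display_monitor_alt
  apply String.toList_inj.mp
  have hlen : PySem.List.len reg = (reg.length : Int) := by simp
  have h0 : ((0:Nat):Int) = 0 := by norm_cast
  rw [hlen, ← h0, pvMapRange reg.length reg 0 (by omega)]
  rw [pvJoin_nil_toList, pvJoin_nil_toList, List.drop_zero, pvCharsB]
  have := pvCharsA reg 0
  rw [h0] at this
  simpa using this
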